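-- pv_equiv track=rewrite | github.com/farber2/starkhacks-WorkingMen | chess_logic/board_map.py | board_from_occupancy
-- ===== SOURCE A (Python) =====
-- def board_from_occupancy(occupancy: dict[str, str | None]) -> list[list[str]]:
--     """Convert occupancy mapping into 8x8 printable matrix."""
--     board = []
--     for rank in range(8, 0, -1):
--         row = []
--         for file_char in "abcdefgh":
--             sq = f"{file_char}{rank}"
--             row.append(occupancy.get(sq) or ".")
--         board.append(row)
--     return board
-- ===== SOURCE B (Python) =====
-- def board_from_occupancy(occupancy: dict[str, str | None]) -> list[list[str]]:
--     """Convert occupancy mapping into 8x8 printable matrix."""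
--     board = [["."] * 8 for _ in range(8)]
--     files = "abcdefgh"
--     for sq, val in occupancy.items():
--         if len(sq) == 2 and sq[0] in files and sq[1] in "12345678":
--             row = 8 - int(sq[1])
--             col = files.index(sq[0])
--             board[row][col] = val or "."
--     return board
-- ===== Notes on version B (the rewrite author's own statement) =====
-- stated objective: faster
-- what changed: Instead of scanning all 64 fixed squares and doing a dict lookup for each, B pre-fills an 8x8 grid of '.' and makes a single pass over the occupancy entries, parsing each key into (row, col) and writing the value (or '.') into the grid.
import Mathlib
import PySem

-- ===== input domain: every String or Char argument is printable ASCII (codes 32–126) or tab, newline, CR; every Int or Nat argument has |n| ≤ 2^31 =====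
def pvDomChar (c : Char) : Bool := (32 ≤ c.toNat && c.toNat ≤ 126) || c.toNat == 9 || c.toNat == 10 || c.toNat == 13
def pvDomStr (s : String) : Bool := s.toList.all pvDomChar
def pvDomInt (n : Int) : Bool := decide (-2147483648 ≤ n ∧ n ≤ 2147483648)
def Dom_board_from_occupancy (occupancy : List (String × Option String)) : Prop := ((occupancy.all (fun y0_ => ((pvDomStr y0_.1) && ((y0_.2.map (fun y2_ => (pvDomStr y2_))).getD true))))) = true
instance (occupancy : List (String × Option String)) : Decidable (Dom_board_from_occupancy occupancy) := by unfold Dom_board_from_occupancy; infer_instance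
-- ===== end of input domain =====

-- B pre-fills an 8x8 '.'-grid and makes one pass over the occupancy entries (parsing each key)
-- instead of A's fixed scan of all 64 squares with a lookup per square; same return value.

-- ===== PORT A =====
-- helper: Python's `<x> or "."` for x an Optional[str]
def pyOrStr (v : Option String) : String :=
  match v with
  | some s => if s = "" then "." else s
  | none => "."

-- helper: `occupancy.get(sq) or "."` (dict.get returns None when the key is absent)
def aGet (occupancy : List (String × Option String)) (sq : String) : String :=
  pyOrStr (((PySem.Dict.mk occupancy).get? sq).getD none)

def board_from_occupancy (occupancy : List (String × Option String)) : List (List String) :=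
  (PySem.List.pyRange 8 0 (-1)).foldl (fun board rank =>
    board ++ [(("abcdefgh".toList).foldl (fun row file_char =>
      row ++ [aGet occupancy (String.ofList (file_char :: PySem.Int.toChars rank))]) [])]) []

-- ===== PORT B =====
def bFiles : List Char := "abcdefgh".toList

-- loop body: one occupancy entry written into the board (Source B's loop body)
def bStep (board : List (List String)) (p : String × Option String) : List (List String) :=
  match p.1.toList with
  | [f, d] =>
    if bFiles.contains f && ("12345678".toList).contains d then
      board.modify (8 - (d.toNat - 48)) (fun row => row.set (bFiles.idxOf f) (pyOrStr p.2))
    else board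
  | _ => board

def board_from_occupancy_alt (occupancy : List (String × Option String)) : List (List String) :=
  occupancy.foldl bStep (List.replicate 8 (List.replicate 8 "."))

-- ===== PRECONDITION & SPEC =====
-- Pre_ excludes only association lists with duplicate keys: a Python dict cannot contain
-- two equal keys, so such lists do not represent any input of the Python function.
def Pre_board_from_occupancy (occupancy : List (String × Option String)) : Prop :=
  (occupancy.map Prod.fst).Nodup
instance (occupancy : List (String × Option String)) : Decidable (Pre_board_from_occupancy occupancy) := by
  unfold Pre_board_from_occupancy; infer_instance

def pvWitness_board_from_occupancy : (List (String × Option String)) :=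
  [("a1", some "P"), ("e8", none), ("e4", some ""), ("zz", some "k")]

def Spec_board_from_occupancy (occupancy : List (String × Option String)) (out : List (List String)) : Prop := out = board_from_occupancy_alt occupancy
instance (occupancy : List (String × Option String)) (out : List (List String)) : Decidable (Spec_board_from_occupancy occupancy out) := by unfold Spec_board_from_occupancy; infer_instance

-- ===== CLAIM (what is proved, stated in full; the proofs are below) =====
def Claim_equal_board_from_occupancy : Prop := ∀ (occupancy : List (String × Option String)), Dom_board_from_occupancy occupancy → Pre_board_from_occupancy occupancy → Spec_board_from_occupancy occupancy (board_from_occupancy occupancy)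

-- ===== LEMMAS AND PROOFS =====

-- proof-side vocabulary: squares as (row, col) names, boards as 8x8 tables of a function
def digitsL : List Char := "12345678".toList
def sqL (r c : Nat) : List Char := bFiles.getD c 'a' :: PySem.Int.toChars (8 - (r : Int))
def sqName (r c : Nat) : String := String.ofList (sqL r c)
def validL (l : List Char) : Bool :=
  match l with
  | [f, d] => bFiles.contains f && digitsL.contains d
  | _ => false
def mkB (g : Nat → Nat → String) : List (List String) :=
  (List.range 8).map (fun r => (List.range 8).map (g r))

theorem A_eq (occ : List (String × Option String)) :
    board_from_occupancy occ = mkB (fun r c => aGet occ (sqName r c)) := rfl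

theorem B_eq (occ : List (String × Option String)) :
    board_from_occupancy_alt occ = occ.foldl bStep (mkB (fun _ _ => ".")) := rfl

theorem mkB_congr {g g' : Nat → Nat → String}
    (h : ∀ r < 8, ∀ c < 8, g r c = g' r c) : mkB g = mkB g' := by
  unfold mkB
  refine List.map_congr_left (fun r hr => List.map_congr_left (fun c hc => ?_))
  exact h r (List.mem_range.mp hr) c (List.mem_range.mp hc)

theorem validL_sqL : ∀ r < 8, ∀ c < 8, validL (sqL r c) = true := by decide

theorem bFiles_lit : bFiles = ['a', 'b', 'c', 'd', 'e', 'f', 'g', 'h'] := rfl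

theorem digitsL_lit : digitsL = ['1', '2', '3', '4', '5', '6', '7', '8'] := rfl

theorem file_idx : ∀ (c : Nat), c < 8 → ∀ f ∈ bFiles, (bFiles.getD c 'a' = f ↔ c = bFiles.idxOf f) := by
  intro c hc f hf
  rw [bFiles_lit] at hf
  interval_cases c <;> fin_cases hf <;> decide

theorem rank_digit : ∀ (r : Nat), r < 8 → ∀ d ∈ digitsL,
    (PySem.Int.toChars (8 - (r : Int)) = [d] ↔ r = 8 - (d.toNat - 48)) := by
  intro r hr d hd
  rw [digitsL_lit] at hd
  interval_cases r <;> fin_cases hd <;> decide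

theorem parse_lt : ∀ f ∈ bFiles, ∀ d ∈ digitsL,
    8 - (d.toNat - 48) < 8 ∧ bFiles.idxOf f < 8 := by
  intro f hf d hd
  rw [bFiles_lit] at hf
  rw [digitsL_lit] at hd
  fin_cases hf <;> fin_cases hd <;> decide

theorem sqL_inj : ∀ f ∈ bFiles, ∀ d ∈ digitsL, ∀ (r : Nat), r < 8 → ∀ (c : Nat), c < 8 →
    (sqL r c = [f, d] ↔ (r = 8 - (d.toNat - 48) ∧ c = bFiles.idxOf f)) := by
  intro f hf d hd r hr c hc
  unfold sqL
  rw [List.cons.injEq, file_idx c hc f hf, rank_digit r hr d hd]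
  exact and_comm

theorem bStep_invalid (b : List (List String)) (p : String × Option String)
    (h : validL p.1.toList = false) : bStep b p = b := by
  unfold bStep
  split
  · next f d heq =>
      rw [heq] at h
      have h2 : (bFiles.contains f && ("12345678".toList).contains d) = false := h
      rw [if_neg (by rw [h2]; exact Bool.false_ne_true)]
  · rfl

theorem bStep_valid (b : List (List String)) (k : String) (v : Option String)
    {f d : Char} (hk : k.toList = [f, d]) (hf : bFiles.contains f = true)
    (hd : digitsL.contains d = true) :
    bStep b (k, v) = b.modify (8 - (d.toNat - 48))
      (fun row => row.set (bFiles.idxOf f) (pyOrStr v)) := by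
  unfold bStep
  split
  · next f' d' heq =>
      simp only at heq
      rw [hk] at heq
      obtain ⟨rfl, rfl⟩ : f = f' ∧ d = d' := by
        injection heq with h1 h2; injection h2 with h2 _; exact ⟨h1, h2⟩
      have hdd : digitsL = "12345678".toList := rfl
      rw [hf, ← hdd, hd]
      rfl
  · next hno => exact absurd hk (by simpa using hno f d)

theorem set_map_range (g1 : Nat → String) (ck : Nat) (x : String) (hc : ck < 8) :
    ((List.range 8).map g1).set ck x = (List.range 8).map (fun c => if c = ck then x else g1 c) := by
  apply List.ext_getElem?
  intro j
  by_cases hj : j < 8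
  · rw [List.getElem?_set, List.getElem?_map, List.getElem?_map, List.getElem?_range hj,
      Option.map_some, Option.map_some]
    by_cases hjc : ck = j
    · subst hjc; simp [hc]
    · rw [if_neg hjc, if_neg (show ¬ j = ck from fun hh => hjc hh.symm)]
  · have hne : ck ≠ j := by omega
    rw [List.getElem?_set, if_neg hne, List.getElem?_map, List.getElem?_map,
      List.getElem?_eq_none (l := List.range 8) (by simp only [List.length_range]; omega)]
    rfl

theorem modify_mkB (g : Nat → Nat → String) (rk ck : Nat) (x : String)
    (_hr : rk < 8) (hc : ck < 8) :
    (mkB g).modify rk (fun row => row.set ck x) =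
      mkB (fun r c => if r = rk ∧ c = ck then x else g r c) := by
  unfold mkB
  apply List.ext_getElem?
  intro i
  rw [List.getElem?_modify, List.getElem?_map, List.getElem?_map]
  by_cases hi : i < 8
  · rw [List.getElem?_range hi]
    simp only [Option.map_eq_map, Option.map_some, Option.some.injEq]
    by_cases hir : rk = i
    · subst hir
      rw [if_pos rfl, set_map_range _ _ _ hc]
      refine List.map_congr_left (fun c _ => ?_)
      by_cases hcc : c = ck
      · subst hcc; simp
      · rw [if_neg hcc, if_neg (fun hh => hcc hh.2)]
    · rw [if_neg hir]
      refine List.map_congr_left (fun c _ => ?_)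
      rw [if_neg (fun hh => hir hh.1.symm)]
  · rw [List.getElem?_eq_none (l := List.range 8) (by simp only [List.length_range]; omega)]
    simp

theorem foldB (occ : List (String × Option String)) (g : Nat → Nat → String)
    (hnd : (occ.map Prod.fst).Nodup) :
    occ.foldl bStep (mkB g) =
      mkB (fun r c =>
        match (PySem.Dict.mk occ).get? (sqName r c) with
        | some v => pyOrStr v
        | none => g r c) := by
  induction occ generalizing g with
  | nil =>
      simp only [List.foldl_nil]
      exact (mkB_congr (fun r hr c hc => rfl)).symm
  | cons p rest ih =>
      obtain ⟨k, v⟩ := p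
      simp only [List.map_cons, List.nodup_cons] at hnd
      obtain ⟨hk_not, hnd'⟩ := hnd
      rw [List.foldl_cons]
      by_cases hval : validL k.toList = true
      · -- the key is a real square name "a1".."h8"
        obtain ⟨f, d, hkl, hf, hd⟩ :
            ∃ f d, k.toList = [f, d] ∧ bFiles.contains f = true ∧ digitsL.contains d = true := by
          unfold validL at hval
          split at hval
          · next f d heq => exact ⟨f, d, heq, (Bool.and_eq_true _ _).mp hval⟩
          · exact absurd hval (by simp)
        have hkeq : k = String.ofList [f, d] := by
          rw [← String.ofList_toList (s := k), hkl]
        have hfm : f ∈ bFiles := by simpa using hf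
        have hdm : d ∈ digitsL := by simpa using hd
        have hlt := parse_lt f hfm d hdm
        rw [bStep_valid _ k v hkl hf hd, modify_mkB _ _ _ _ hlt.1 hlt.2, ih _ hnd']
        apply mkB_congr
        intro r hr c hc
        rw [PySem.Dict.get?_mk_cons]
        by_cases hsq : sqL r c = [f, d]
        · have hrc := (sqL_inj f hfm d hdm r hr c hc).mp hsq
          have hksq : sqName r c = k := by rw [hkeq]; unfold sqName; rw [hsq]
          have hbeq : (k == sqName r c) = true := by rw [beq_iff_eq, hksq]
          rw [hbeq]
          simp only [if_true]
          have hnone : (PySem.Dict.mk rest).get? (sqName r c) = none := by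
            rw [PySem.Dict.get?_eq_none_iff_not_mem_keys, hksq]
            simpa [PySem.Dict.keys_mk] using hk_not
          rw [hnone, if_pos ⟨hrc.1, hrc.2⟩]
        · have hbeq : (k == sqName r c) = false := by
            rw [beq_eq_false_iff_ne, hkeq]
            intro hh
            apply hsq
            have := congrArg String.toList hh.symm
            rwa [String.toList_ofList, sqName, String.toList_ofList] at this
          rw [hbeq]
          simp only [Bool.false_eq_true, if_false]
          rw [if_neg (fun hh => hsq ((sqL_inj f hfm d hdm r hr c hc).mpr ⟨hh.1, hh.2⟩))]
      · -- the key is not a square: writing nothing, and no lookup can hit it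
        rw [bStep_invalid _ _ (by simpa using hval), ih _ hnd']
        apply mkB_congr
        intro r hr c hc
        rw [PySem.Dict.get?_mk_cons]
        have hbeq : (k == sqName r c) = false := by
          rw [beq_eq_false_iff_ne]
          intro hh
          apply hval
          have hkl : k.toList = sqL r c := by rw [hh]; exact String.toList_ofList
          rw [hkl]
          exact validL_sqL r hr c hc
        rw [hbeq]
        simp only [Bool.false_eq_true, if_false]

-- ===== VERDICT (by name: the statement is the Claim_ definition above) =====
theorem board_from_occupancy_spec : Claim_equal_board_from_occupancy := by
  intro occ _ hpre
  unfold Spec_board_from_occupancy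
  rw [A_eq, B_eq, foldB occ _ hpre]
  apply mkB_congr
  intro r hr c hc
  cases h : (PySem.Dict.mk occ).get? (sqName r c) <;> simp [aGet, h, pyOrStr]
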